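-- pv_equiv track=rewrite | github.com/MichaelTroelsen/SIDM2conv | archive/experiments/final_sequence_hunt.py | find_pattern_in_sid
-- ===== SOURCE A (Python) =====
-- def find_pattern_in_sid(sid_data, pattern, min_match=10):
--     """Find where a pattern from SF2 appears in SID."""
--     matches = []
--
--     for i in range(len(sid_data) - min_match):
--         match_len = 0
--         for j in range(min(len(pattern), len(sid_data) - i)):
--             if sid_data[i + j] == pattern[j]:
--                 match_len += 1
--             else:
--                 break
--
--         if match_len >= min_match:
--             matches.append({'offset': i, 'length': match_len})
--
--     return matches
-- ===== SOURCE B (Python) =====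
-- def find_pattern_in_sid(sid_data, pattern, min_match=10):
--     """Find where a pattern from SF2 appears in SID (column-wise pruning)."""
--     n = len(sid_data)
--     limit = n - min_match                      # candidate offsets are 0 .. limit-1
--     lengths = [0] * max(limit, 0)              # lengths[i] = prefix-match length at offset i
--     alive = list(range(min(limit, n)))         # offsets still extending their match
--     j = 0
--     while alive and j < len(pattern):
--         p = pattern[j]
--         nxt = []
--         for i in alive:
--             if i + j < n and sid_data[i + j] == p:
--                 lengths[i] = j + 1
--                 nxt.append(i)
--         alive = nxt
--         j += 1
--     return [{'offset': i, 'length': lengths[i]}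
--             for i in range(len(lengths)) if lengths[i] >= min_match]
-- ===== Notes on version B (the rewrite author's own statement) =====
-- stated objective: alternative
-- what changed: B matches column-wise: it walks pattern positions once, maintaining a shrinking worklist of offsets whose match is still extending, instead of A's row-wise outer loop that re-runs an inner comparison scan for every offset.
import Mathlib
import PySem

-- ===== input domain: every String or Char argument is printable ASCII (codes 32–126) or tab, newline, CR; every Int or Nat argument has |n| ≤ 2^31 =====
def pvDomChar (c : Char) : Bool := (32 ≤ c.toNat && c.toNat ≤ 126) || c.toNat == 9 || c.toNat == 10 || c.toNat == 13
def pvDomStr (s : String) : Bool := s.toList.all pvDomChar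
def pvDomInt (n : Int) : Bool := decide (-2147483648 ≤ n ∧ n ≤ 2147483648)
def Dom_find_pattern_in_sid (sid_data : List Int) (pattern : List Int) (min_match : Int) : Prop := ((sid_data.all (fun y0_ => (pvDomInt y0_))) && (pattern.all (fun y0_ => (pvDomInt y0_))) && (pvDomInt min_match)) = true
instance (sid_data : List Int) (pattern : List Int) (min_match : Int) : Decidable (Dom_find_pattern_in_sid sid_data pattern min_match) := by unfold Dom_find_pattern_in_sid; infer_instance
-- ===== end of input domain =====

-- B re-implements A's prefix-match search column-wise (worklist of still-matching offsets)
-- instead of row-wise; same result, an alternative traversal (no speed claim).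

-- ===== PORT A =====
-- inner 'for j in range(...): if equal: match_len += 1 else: break'
def aInner (sid pattern : List Int) (i : Int) : List Int → Int → Int
  | [], ml => ml
  | j :: js, ml =>
    if PySem.List.pyGet? sid (i + j) = PySem.List.pyGet? pattern j
    then aInner sid pattern i js (ml + 1) else ml

def find_pattern_in_sid (sid_data : List Int) (pattern : List Int) (min_match : Int) : List (List (String × Int)) :=
  (PySem.List.pyRange 0 ((sid_data.length : Int) - min_match) 1).foldl
    (fun ms i =>
      let ml := aInner sid_data pattern i
        (PySem.List.pyRange 0 (min (pattern.length : Int) ((sid_data.length : Int) - i)) 1) 0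
      if min_match ≤ ml then ms ++ [[("offset", i), ("length", ml)]] else ms)
    []

-- ===== PORT B =====
-- 'while alive and j < len(pattern)': one recursion step per pattern column
def bLoop (sid : List Int) : List Int → Nat → List Nat → List Int → List Int
  | [], _, _, lengths => lengths
  | p :: ps, j, alive, lengths =>
    if alive.isEmpty then lengths
    else
      let st := alive.foldl
        (fun (st : List Nat × List Int) i =>
          if i + j < sid.length ∧ sid.getD (i + j) 0 = p
          then (st.1 ++ [i], st.2.set i ((j : Int) + 1))
          else st) ([], lengths)
      bLoop sid ps (j + 1) st.1 st.2

def find_pattern_in_sid_alt (sid_data : List Int) (pattern : List Int) (min_match : Int) : List (List (String × Int)) :=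
  let n : Int := sid_data.length
  let limit : Int := n - min_match
  let lengths := List.replicate (max limit 0).toNat (0 : Int)
  let alive := List.range (min limit n).toNat
  let final := bLoop sid_data pattern 0 alive lengths
  (List.range final.length).foldl
    (fun res i =>
      if min_match ≤ final.getD i 0
      then res ++ [[("offset", (i : Int)), ("length", final.getD i 0)]] else res)
    []

-- ===== PRECONDITION & SPEC =====
def Spec_find_pattern_in_sid (sid_data : List Int) (pattern : List Int) (min_match : Int) (out : List (List (String × Int))) : Prop := out = find_pattern_in_sid_alt sid_data pattern min_match
instance (sid_data : List Int) (pattern : List Int) (min_match : Int) (out : List (List (String × Int))) : Decidable (Spec_find_pattern_in_sid sid_data pattern min_match out) := by unfold Spec_find_pattern_in_sid; infer_instance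

-- ===== CLAIM (what is proved, stated in full; the proofs are below) =====
def Claim_equal_find_pattern_in_sid : Prop := ∀ (sid_data : List Int) (pattern : List Int) (min_match : Int), Dom_find_pattern_in_sid sid_data pattern min_match → Spec_find_pattern_in_sid sid_data pattern min_match (find_pattern_in_sid sid_data pattern min_match)

-- ===== LEMMAS AND PROOFS =====

-- length of the longest common prefix (the value both programs compute per offset)
def lcpN : List Int → List Int → Nat
  | x :: xs, p :: ps => if x = p then lcpN xs ps + 1 else 0
  | _, _ => 0

lemma lcpN_nil_left (ps : List Int) : lcpN [] ps = 0 := by cases ps <;> rfl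

lemma lcpN_nil_right (xs : List Int) : lcpN xs [] = 0 := by cases xs <;> rfl

lemma lcpN_le_right (xs ps : List Int) : lcpN xs ps ≤ ps.length := by
  induction xs generalizing ps with
  | nil => simp [lcpN_nil_left]
  | cons x xs ih =>
    cases ps with
    | nil => simp [lcpN_nil_right]
    | cons p ps =>
      simp only [lcpN, List.length_cons]
      split_ifs
      · exact Nat.succ_le_succ (ih ps)
      · exact Nat.zero_le _

lemma lcpN_succ_le_iff (j : Nat) : ∀ (xs ps : List Int),
    (j + 1 ≤ lcpN xs ps) ↔
      (j ≤ lcpN xs ps ∧ j < xs.length ∧ j < ps.length ∧ xs.getD j 0 = ps.getD j 0) := by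
  induction j with
  | zero =>
    intro xs ps
    cases xs with
    | nil => simp [lcpN_nil_left]
    | cons x xs =>
      cases ps with
      | nil => simp [lcpN_nil_right]
      | cons p ps =>
        by_cases h : x = p <;> simp [lcpN, h]
  | succ j ih =>
    intro xs ps
    cases xs with
    | nil => simp [lcpN_nil_left]
    | cons x xs =>
      cases ps with
      | nil => simp [lcpN_nil_right]
      | cons p ps =>
        by_cases h : x = p
        · simp only [lcpN, if_pos h, List.length_cons, List.getD_cons_succ]
          have hiff := ih xs ps
          constructor
          · intro hle
            have h1 : j + 1 ≤ lcpN xs ps := by omega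
            have h2 := hiff.mp h1
            exact ⟨by omega, by omega, by omega, h2.2.2.2⟩
          · rintro ⟨h1, h2, h3, h4⟩
            have : j + 1 ≤ lcpN xs ps := hiff.mpr ⟨by omega, by omega, by omega, h4⟩
            omega
        · simp only [lcpN, if_neg h, List.length_cons]
          constructor
          · intro h'; omega
          · rintro ⟨h1, -, -, -⟩; omega

-- ===== A-side characterisation =====
lemma aInner_go (sid pattern : List Int) (i : Nat) (hin : i ≤ sid.length) :
    ∀ (m j : Nat) (ml : Int), j + m = min pattern.length (sid.length - i) →
      aInner sid pattern (i : Int)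
        (PySem.List.pyRange (j : Int) (min (pattern.length : Int) ((sid.length : Int) - (i : Int))) 1) ml
      = ml + (lcpN (sid.drop (i + j)) (pattern.drop j) : Int) := by
  have hcap : (min (pattern.length : Int) ((sid.length : Int) - (i : Int)))
      = ((min pattern.length (sid.length - i) : Nat) : Int) := by omega
  intro m
  induction m with
  | zero =>
    intro j ml hj
    rw [hcap, PySem.List.pyRange_one_eq_nil (by omega)]
    simp only [aInner]
    by_cases h : pattern.length ≤ sid.length - i
    · have hp : pattern.drop j = [] := List.drop_eq_nil_of_le (by omega)
      rw [hp, lcpN_nil_right]; ring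
    · have hs : sid.drop (i + j) = [] := List.drop_eq_nil_of_le (by omega)
      rw [hs, lcpN_nil_left]; ring
  | succ m ihm =>
    intro j ml hj
    have hjp : j < pattern.length := by omega
    have hjs : i + j < sid.length := by omega
    rw [hcap, PySem.List.pyRange_one_cons (by omega)]
    simp only [aInner]
    have e1 : PySem.List.pyGet? sid ((i : Int) + (j : Int)) = some sid[i + j] := by
      rw [show ((i : Int) + (j : Int)) = ((i + j : Nat) : Int) by push_cast; ring,
        PySem.List.pyGet?_natCast, List.getElem?_eq_getElem hjs]
    have e2 : PySem.List.pyGet? pattern ((j : Nat) : Int) = some pattern[j] := by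
      rw [PySem.List.pyGet?_natCast, List.getElem?_eq_getElem hjp]
    rw [e1, e2]
    have hd1 : sid.drop (i + j) = sid[i + j] :: sid.drop (i + j + 1) :=
      List.drop_eq_getElem_cons hjs
    have hd2 : pattern.drop j = pattern[j] :: pattern.drop (j + 1) :=
      List.drop_eq_getElem_cons hjp
    by_cases he : sid[i + j] = pattern[j]
    · rw [if_pos (by rw [he])]
      have hrec := ihm (j + 1) (ml + 1) (by omega)
      rw [hcap, show i + (j + 1) = i + j + 1 from by omega] at hrec
      rw [show ((j : Nat) : Int) + 1 = ((j + 1 : Nat) : Int) by push_cast; ring, hrec,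
        hd1, hd2]
      simp only [lcpN, if_pos he]
      push_cast
      omega
    · rw [if_neg (by simp [he])]
      rw [hd1, hd2]
      simp only [lcpN, if_neg he]
      simp

lemma aInner_eq (sid pattern : List Int) (i : Nat) :
    aInner sid pattern (i : Int)
      (PySem.List.pyRange 0 (min (pattern.length : Int) ((sid.length : Int) - (i : Int))) 1) 0
    = (lcpN (sid.drop i) pattern : Int) := by
  by_cases hin : i ≤ sid.length
  · have h := aInner_go sid pattern i hin (min pattern.length (sid.length - i)) 0 0 (by omega)
    simpa using h
  · rw [PySem.List.pyRange_one_eq_nil (le_trans (min_le_right _ _) (by omega))]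
    simp only [aInner]
    rw [List.drop_eq_nil_of_le (by omega), lcpN_nil_left]
    simp

-- ===== B-side characterisation =====
lemma bFold_spec (sid : List Int) (p : Int) (j : Nat) :
    ∀ (alive : List Nat) (acc : List Nat) (lengths : List Int),
      (∀ i ∈ alive, i < lengths.length) →
      (alive.foldl
        (fun (st : List Nat × List Int) i =>
          if i + j < sid.length ∧ sid.getD (i + j) 0 = p
          then (st.1 ++ [i], st.2.set i ((j : Int) + 1))
          else st) (acc, lengths)).1
        = acc ++ alive.filter (fun i => decide (i + j < sid.length ∧ sid.getD (i + j) 0 = p)) ∧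
      (alive.foldl
        (fun (st : List Nat × List Int) i =>
          if i + j < sid.length ∧ sid.getD (i + j) 0 = p
          then (st.1 ++ [i], st.2.set i ((j : Int) + 1))
          else st) (acc, lengths)).2.length = lengths.length ∧
      ∀ k, (alive.foldl
        (fun (st : List Nat × List Int) i =>
          if i + j < sid.length ∧ sid.getD (i + j) 0 = p
          then (st.1 ++ [i], st.2.set i ((j : Int) + 1))
          else st) (acc, lengths)).2.getD k 0
        = if k ∈ alive ∧ k + j < sid.length ∧ sid.getD (k + j) 0 = p
          then ((j : Int) + 1) else lengths.getD k 0 := by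
  intro alive
  induction alive with
  | nil => intro acc lengths _; simp
  | cons i rest ih =>
    intro acc lengths hlt
    simp only [List.foldl_cons]
    by_cases hc : i + j < sid.length ∧ sid.getD (i + j) 0 = p
    · rw [if_pos hc]
      have hlen : i < lengths.length := hlt i (by simp)
      have hlt' : ∀ x ∈ rest, x < (lengths.set i ((j : Int) + 1)).length := by
        simpa using fun x hx => hlt x (List.mem_cons_of_mem _ hx)
      obtain ⟨h1, h2, h3⟩ := ih (acc ++ [i]) (lengths.set i ((j : Int) + 1)) hlt'
      refine ⟨?_, ?_, ?_⟩
      · rw [h1, List.filter_cons_of_pos (by simpa using hc)]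
        simp
      · rw [h2, List.length_set]
      · intro k
        rw [h3 k]
        by_cases hk : k ∈ rest ∧ k + j < sid.length ∧ sid.getD (k + j) 0 = p
        · rw [if_pos hk, if_pos ⟨List.mem_cons_of_mem _ hk.1, hk.2⟩]
        · rw [if_neg hk]
          by_cases hki : k = i
          · subst hki
            rw [if_pos ⟨List.mem_cons_self, hc⟩]
            simp [List.getD_eq_getElem?_getD, hlen]
          · rw [if_neg (by
              rintro ⟨hm, hrest⟩
              rcases List.mem_cons.mp hm with h' | h'
              · exact hki h'
              · exact hk ⟨h', hrest⟩)]
            simp [List.getD_eq_getElem?_getD, Ne.symm hki]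
    · rw [if_neg hc]
      obtain ⟨h1, h2, h3⟩ := ih acc lengths (fun x hx => hlt x (List.mem_cons_of_mem _ hx))
      refine ⟨?_, h2, ?_⟩
      · rw [h1, List.filter_cons_of_neg (by simpa using hc)]
      · intro k
        rw [h3 k]
        by_cases hk : k ∈ rest ∧ k + j < sid.length ∧ sid.getD (k + j) 0 = p
        · rw [if_pos hk, if_pos ⟨List.mem_cons_of_mem _ hk.1, hk.2⟩]
        · rw [if_neg hk, if_neg (by
            rintro ⟨hm, hrest⟩
            rcases List.mem_cons.mp hm with h' | h'
            · subst h'; exact hc hrest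
            · exact hk ⟨h', hrest⟩)]

lemma bLoop_spec (sid pattern : List Int) (A0 : Nat) (hA0 : A0 ≤ sid.length) :
    ∀ (ps : List Int) (j : Nat) (alive : List Nat) (lengths : List Int),
      ps = pattern.drop j →
      alive = (List.range A0).filter (fun i => decide (j ≤ lcpN (sid.drop i) pattern)) →
      A0 ≤ lengths.length →
      (∀ k, lengths.getD k 0 = if k < A0 then (min (lcpN (sid.drop k) pattern) j : Int) else 0) →
      (bLoop sid ps j alive lengths).length = lengths.length ∧
      ∀ k, (bLoop sid ps j alive lengths).getD k 0
            = if k < A0 then (lcpN (sid.drop k) pattern : Int) else 0 := by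
  intro ps
  induction ps with
  | nil =>
    intro j alive lengths hps halive hA0len hval
    refine ⟨rfl, fun k => ?_⟩
    rw [bLoop, hval k]
    by_cases hk : k < A0
    · rw [if_pos hk, if_pos hk]
      have h1 : pattern.length ≤ j := by
        have := List.drop_eq_nil_iff.mp hps.symm
        omega
      have h2 := lcpN_le_right (sid.drop k) pattern
      omega
    · rw [if_neg hk, if_neg hk]
  | cons p ps' ih =>
    intro j alive lengths hps halive hA0len hval
    simp only [bLoop]
    by_cases hemp : alive.isEmpty
    · rw [if_pos hemp]
      have hnil : alive = [] := List.isEmpty_iff.mp hemp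
      refine ⟨rfl, fun k => ?_⟩
      rw [hval k]
      by_cases hk : k < A0
      · rw [if_pos hk, if_pos hk]
        have hnle : ¬ (j ≤ lcpN (sid.drop k) pattern) := by
          intro hle
          have hmem : k ∈ alive := by
            rw [halive]
            exact List.mem_filter.mpr ⟨List.mem_range.mpr hk, by simpa using hle⟩
          simp [hnil] at hmem
        omega
      · rw [if_neg hk, if_neg hk]
    · rw [if_neg hemp]
      have hmemlen : ∀ x ∈ alive, x < lengths.length := by
        intro x hx
        rw [halive] at hx
        have := List.mem_range.mp (List.mem_filter.mp hx).1
        omega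
      obtain ⟨h1, h2, h3⟩ := bFold_spec sid p j alive [] lengths hmemlen
      have hjp : j < pattern.length := by
        by_contra hge
        rw [List.drop_eq_nil_of_le (by omega)] at hps
        exact List.cons_ne_nil _ _ hps
      have hpj : pattern.getD j 0 = p := by
        have h0 : pattern[j]? = some p := by
          have hh := congrArg (fun l : List Int => l[0]?) hps
          simpa [List.getElem?_drop] using hh.symm
        simp [List.getD_eq_getElem?_getD, h0]
      have hps' : ps' = pattern.drop (j + 1) := by
        have ht := congrArg List.tail hps
        simpa [List.tail_drop] using ht
      -- the per-offset transfer: surviving column j means lcp ≥ j+1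
      have htrans : ∀ x, x < A0 →
          ((j ≤ lcpN (sid.drop x) pattern ∧
            (x + j < sid.length ∧ sid.getD (x + j) 0 = p)) ↔
           j + 1 ≤ lcpN (sid.drop x) pattern) := by
        intro x hx
        have hiff := lcpN_succ_le_iff j (sid.drop x) pattern
        have hlen2 : (sid.drop x).length = sid.length - x := List.length_drop
        have hgd : (sid.drop x).getD j 0 = sid.getD (x + j) 0 := by
          simp [List.getD_eq_getElem?_getD, List.getElem?_drop, Nat.add_comm x j]
        rw [hlen2, hgd, hpj] at hiff
        constructor
        · rintro ⟨ha, hb1, hb2⟩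
          exact hiff.mpr ⟨ha, by omega, by omega, hb2⟩
        · intro hc
          obtain ⟨c1, c2, c3, c4⟩ := hiff.mp hc
          exact ⟨c1, by omega, c4⟩
      obtain ⟨r1, r2⟩ := ih (j + 1)
        ((alive.foldl
          (fun (st : List Nat × List Int) i =>
            if i + j < sid.length ∧ sid.getD (i + j) 0 = p
            then (st.1 ++ [i], st.2.set i ((j : Int) + 1))
            else st) ([], lengths)).1)
        ((alive.foldl
          (fun (st : List Nat × List Int) i =>
            if i + j < sid.length ∧ sid.getD (i + j) 0 = p
            then (st.1 ++ [i], st.2.set i ((j : Int) + 1))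
            else st) ([], lengths)).2)
        hps'
        (by
          rw [h1, List.nil_append, halive, List.filter_filter]
          apply List.filter_congr
          intro x hx
          have hxA0 : x < A0 := List.mem_range.mp hx
          rw [← Bool.decide_and, decide_eq_decide]
          exact and_comm.trans (htrans x hxA0))
        (by rw [h2]; exact hA0len)
        (by
          intro k
          rw [h3 k]
          by_cases hk : k < A0
          · by_cases hkl : j + 1 ≤ lcpN (sid.drop k) pattern
            · rw [if_pos ?_, if_pos hk]
              · omega
              · obtain ⟨c1, c2⟩ := (htrans k hk).mpr hkl
                refine ⟨?_, c2⟩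
                rw [halive]
                exact List.mem_filter.mpr ⟨List.mem_range.mpr hk, by simpa using c1⟩
            · rw [if_neg ?_, hval k, if_pos hk, if_pos hk]
              · omega
              · rintro ⟨hm, hb⟩
                rw [halive] at hm
                have hj1 := (List.mem_filter.mp hm).2
                exact hkl ((htrans k hk).mp ⟨by simpa using hj1, hb⟩)
          · rw [if_neg ?_, hval k, if_neg hk, if_neg hk]
            rintro ⟨hm, -⟩
            rw [halive] at hm
            exact hk (List.mem_range.mp (List.mem_filter.mp hm).1))
      exact ⟨by rw [r1, h2], r2⟩

-- ===== VERDICT (by name: the statement is the Claim_ definition above) =====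
theorem find_pattern_in_sid_spec : Claim_equal_find_pattern_in_sid := by
  intro sid pattern mm _
  unfold Spec_find_pattern_in_sid find_pattern_in_sid find_pattern_in_sid_alt
  simp only [PySem.List.foldl_append_ite, List.nil_append, PySem.List.pyRange_one,
    List.filter_map, List.map_map, Int.sub_zero, zero_add]
  have hg : ∀ k : Nat, aInner sid pattern (k : Int)
      (List.map (fun t : Nat => (t : Int))
        (List.range (min ((pattern.length : Int)) ((sid.length : Int) - (k : Int))).toNat)) 0
      = (lcpN (sid.drop k) pattern : Int) := by
    intro k
    have h := aInner_eq sid pattern k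
    rw [PySem.List.pyRange_one] at h
    simpa using h
  simp only [Function.comp_def, hg]
  have hA0le : (min ((sid.length : Int) - mm) (sid.length : Int)).toNat ≤ sid.length := by
    omega
  obtain ⟨hlenF, hvalF⟩ := bLoop_spec sid pattern _ hA0le pattern 0
      (List.range (min ((sid.length : Int) - mm) (sid.length : Int)).toNat)
      (List.replicate (max ((sid.length : Int) - mm) 0).toNat (0 : Int))
      (by simp)
      (by simp)
      (by simp only [List.length_replicate]; omega)
      (by
        intro k
        have hz : ((List.replicate (max ((sid.length : Int) - mm) 0).toNat (0 : Int)).getD k 0)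
            = 0 := by
          simp [List.getD_eq_getElem?_getD, List.getElem?_replicate]
          split_ifs <;> simp
        rw [hz]
        split_ifs <;> omega)
  rw [hlenF]
  simp only [List.length_replicate]
  have hmax : (max ((sid.length : Int) - mm) 0).toNat = ((sid.length : Int) - mm).toNat := by
    omega
  rw [hmax] at hvalF ⊢
  have hval' : ∀ k, k < ((sid.length : Int) - mm).toNat →
      (bLoop sid pattern 0 (List.range (min ((sid.length : Int) - mm) (sid.length : Int)).toNat)
        (List.replicate ((sid.length : Int) - mm).toNat (0 : Int))).getD k 0
      = (lcpN (sid.drop k) pattern : Int) := by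
    intro k hkL
    rw [hvalF k]
    by_cases hk : k < (min ((sid.length : Int) - mm) (sid.length : Int)).toNat
    · rw [if_pos hk]
    · rw [if_neg hk]
      have hksid : sid.length ≤ k := by omega
      rw [List.drop_eq_nil_of_le hksid, lcpN_nil_left]
      simp
  have hf : (List.range ((sid.length : Int) - mm).toNat).filter
        (fun x => decide (mm ≤ (bLoop sid pattern 0
          (List.range (min ((sid.length : Int) - mm) (sid.length : Int)).toNat)
          (List.replicate ((sid.length : Int) - mm).toNat (0 : Int))).getD x 0))
      = (List.range ((sid.length : Int) - mm).toNat).filter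
        (fun x => decide (mm ≤ (lcpN (sid.drop x) pattern : Int))) :=
    List.filter_congr (fun k hk => by rw [hval' k (List.mem_range.mp hk)])
  rw [hf]
  exact List.map_congr_left (fun k hk => by
    rw [hval' k (List.mem_range.mp (List.mem_filter.mp hk).1)])
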